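-- pv_equiv track=rewrite | github.com/reilleya/pyFormGen | pyFormGen/units.py | getAllConversions
-- ===== SOURCE A (Python) =====
-- unitTable = [
--     ('m', 'cm', 100),
--     ('m', 'mm', 1000),
--     ('m', 'in', 39.37),
--     ('m', '64th in', 2519.68),
--     ('m', 'ft', 3.28),
--
--     ('m/s', 'cm/s', 100),
--     ('m/s', 'mm/s', 1000),
--     ('m/s', 'ft/s', 3.28),
--     ('m/s', 'in/s', 39.37),
--
--     ('N', 'lbf', 0.2248),
--
--     ('Ns', 'lbfs', 0.2248),
--
--     ('Pa', 'MPa', 1/1000000),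
--     ('Pa', 'psi', 1/6895),
--
--     ('kg', 'g', 1000),
--     ('kg', 'lb', 2.205),
--     ('kg', 'oz', 2.205 * 16),
--
--     ('kg/m^3', 'lb/in^3', 3.61273e-5),
--     ('kg/m^3', 'g/cm^3', 0.001)
-- ]
--
-- def getAllConversions(unit):
--     """Returns a list of all units that the passed unit can be converted to."""
--     allConversions = [unit]
--     for conversion in unitTable:
--         if conversion[0] == unit:
--             allConversions.append(conversion[1])
--         elif conversion[1] == unit:
--             allConversions.append(conversion[0])
--     return allConversions
-- ===== SOURCE B (Python) =====
-- # Hand-maintained adjacency map: each unit -> the units it converts to, in table order.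
-- _conversionMap = {
--     'm': ['cm', 'mm', 'in', '64th in', 'ft'],
--     'cm': ['m'], 'mm': ['m'], 'in': ['m'], '64th in': ['m'], 'ft': ['m'],
--     'm/s': ['cm/s', 'mm/s', 'ft/s', 'in/s'],
--     'cm/s': ['m/s'], 'mm/s': ['m/s'], 'ft/s': ['m/s'], 'in/s': ['m/s'],
--     'N': ['lbf'], 'lbf': ['N'],
--     'Ns': ['lbfs'], 'lbfs': ['Ns'],
--     'Pa': ['MPa', 'psi'], 'MPa': ['Pa'], 'psi': ['Pa'],
--     'kg': ['g', 'lb', 'oz'], 'g': ['kg'], 'lb': ['kg'], 'oz': ['kg'],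
--     'kg/m^3': ['lb/in^3', 'g/cm^3'], 'lb/in^3': ['kg/m^3'], 'g/cm^3': ['kg/m^3'],
-- }
--
-- def getAllConversions(unit):
--     """Returns a list of all units that the passed unit can be converted to."""
--     return [unit] + _conversionMap.get(unit, [])
-- ===== Notes on version B (the rewrite author's own statement) =====
-- stated objective: alternative
-- what changed: A rescans the whole unit table on every call, appending partners as it goes; B stores the conversion graph as a literal adjacency dict (unit -> partners in table order) and the function body is a single dict lookup with no loop.
import Mathlib
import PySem

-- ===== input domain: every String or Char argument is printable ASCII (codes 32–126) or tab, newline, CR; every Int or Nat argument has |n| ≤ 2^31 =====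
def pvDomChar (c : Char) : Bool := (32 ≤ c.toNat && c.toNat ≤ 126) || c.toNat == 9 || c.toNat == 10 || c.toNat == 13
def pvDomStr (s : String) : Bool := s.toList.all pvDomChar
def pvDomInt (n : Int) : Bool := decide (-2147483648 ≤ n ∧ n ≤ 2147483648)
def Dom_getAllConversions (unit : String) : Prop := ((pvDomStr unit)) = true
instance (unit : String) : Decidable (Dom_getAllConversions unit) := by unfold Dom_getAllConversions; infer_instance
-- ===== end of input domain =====

-- B replaces A's per-call scan of the conversion table by a lookup in a literal adjacency map
-- (unit -> its conversion partners), so the function body is a single dict get (alternative).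


-- ===== PORT A =====
-- unitTable: the third component (a float conversion factor) is never read by
-- getAllConversions, so the table is ported as the list of its (unit, unit) pairs.
def unitTablePairs : List (String × String) :=
  [("m", "cm"), ("m", "mm"), ("m", "in"), ("m", "64th in"), ("m", "ft"),
   ("m/s", "cm/s"), ("m/s", "mm/s"), ("m/s", "ft/s"), ("m/s", "in/s"),
   ("N", "lbf"),
   ("Ns", "lbfs"),
   ("Pa", "MPa"), ("Pa", "psi"),
   ("kg", "g"), ("kg", "lb"), ("kg", "oz"),
   ("kg/m^3", "lb/in^3"), ("kg/m^3", "g/cm^3")]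

def getAllConversions (unit : String) : List String :=
  unitTablePairs.foldl (fun allConversions conversion =>
    if conversion.1 = unit then allConversions ++ [conversion.2]
    else if conversion.2 = unit then allConversions ++ [conversion.1]
    else allConversions) [unit]

-- ===== PORT B =====
-- the hand-maintained literal adjacency dict _conversionMap of Source B
def conversionMap : PySem.Dict String (List String) :=
  PySem.Dict.ofList
    [("m", ["cm", "mm", "in", "64th in", "ft"]),
     ("cm", ["m"]), ("mm", ["m"]), ("in", ["m"]), ("64th in", ["m"]), ("ft", ["m"]),
     ("m/s", ["cm/s", "mm/s", "ft/s", "in/s"]),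
     ("cm/s", ["m/s"]), ("mm/s", ["m/s"]), ("ft/s", ["m/s"]), ("in/s", ["m/s"]),
     ("N", ["lbf"]), ("lbf", ["N"]),
     ("Ns", ["lbfs"]), ("lbfs", ["Ns"]),
     ("Pa", ["MPa", "psi"]), ("MPa", ["Pa"]), ("psi", ["Pa"]),
     ("kg", ["g", "lb", "oz"]), ("g", ["kg"]), ("lb", ["kg"]), ("oz", ["kg"]),
     ("kg/m^3", ["lb/in^3", "g/cm^3"]), ("lb/in^3", ["kg/m^3"]), ("g/cm^3", ["kg/m^3"])]

def getAllConversions_alt (unit : String) : List String :=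
  [unit] ++ conversionMap.getD unit []

-- ===== PRECONDITION & SPEC =====
def Spec_getAllConversions (unit : String) (out : List String) : Prop := out = getAllConversions_alt unit
instance (unit : String) (out : List String) : Decidable (Spec_getAllConversions unit out) := by unfold Spec_getAllConversions; infer_instance

-- ===== CLAIM =====
def Claim_equal_getAllConversions : Prop := ∀ (unit : String), Dom_getAllConversions unit → Spec_getAllConversions unit (getAllConversions unit)

-- ===== LEMMAS AND PROOFS =====

-- all unit names occurring anywhere in the table
def allUnitNames : List String :=
  ["m", "cm", "mm", "in", "64th in", "ft",
   "m/s", "cm/s", "mm/s", "ft/s", "in/s",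
   "N", "lbf", "Ns", "lbfs", "Pa", "MPa", "psi",
   "kg", "g", "lb", "oz", "kg/m^3", "lb/in^3", "g/cm^3"]

theorem table_units_mem : ∀ c ∈ unitTablePairs, c.1 ∈ allUnitNames ∧ c.2 ∈ allUnitNames := by
  decide

theorem map_keys_mem : ∀ k ∈ conversionMap.keys, k ∈ allUnitNames := by decide

-- A's scan leaves the accumulator unchanged when no table entry mentions the unit.
theorem foldl_no_match (unit : String) (t : List (String × String)) (acc : List String)
    (h : ∀ c ∈ t, c.1 ≠ unit ∧ c.2 ≠ unit) :
    t.foldl (fun allConversions conversion =>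
      if conversion.1 = unit then allConversions ++ [conversion.2]
      else if conversion.2 = unit then allConversions ++ [conversion.1]
      else allConversions) acc = acc := by
  induction t generalizing acc with
  | nil => rfl
  | cons c rest ih =>
    have hc := h c (by simp)
    simp only [List.foldl_cons, if_neg hc.1, if_neg hc.2]
    exact ih _ (fun x hx => h x (by simp [hx]))

-- ===== VERDICT =====
theorem getAllConversions_spec : Claim_equal_getAllConversions := by
  intro unit _
  unfold Spec_getAllConversions
  by_cases h : unit ∈ allUnitNames
  · fin_cases h <;> decide
  · unfold getAllConversions getAllConversions_alt
    rw [foldl_no_match unit unitTablePairs [unit]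
        (fun c hc => ⟨fun e => h (e ▸ (table_units_mem c hc).1),
                      fun e => h (e ▸ (table_units_mem c hc).2)⟩)]
    have hk : conversionMap.contains unit = false := by
      rw [PySem.Dict.contains_eq_decide_mem_keys]
      exact decide_eq_false (fun hm => h (map_keys_mem unit hm))
    rw [PySem.Dict.getD_of_not_contains conversionMap [] hk]; rfl
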